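-- pv_equiv track=rewrite | github.com/MrBrantCode/unitest_baseline | mut_generate/mist_train_cf/cf_2734/solution.py | get_sublist
-- ===== SOURCE A (Python) =====
-- def get_sublist(lst, certain_value, divisible_value):
--     sublist = []
--     for num in lst:
--         if num > certain_value and num % divisible_value == 0 and num not in sublist:
--             sublist.append(num)
--             if len(sublist) == 15:
--                 break
--
--     # Bubble sort the sublist in descending order
--     for i in range(len(sublist) - 1):
--         for j in range(len(sublist) - 1 - i):
--             if sublist[j] < sublist[j+1]:
--                 sublist[j], sublist[j+1] = sublist[j+1], sublist[j]
--
--     # Remove extra elements if length > 15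
--     sublist = sublist[:15]
--
--     return sublist
-- ===== SOURCE B (Python) =====
-- def get_sublist(lst, certain_value, divisible_value):
--     seen = set()
--     for num in lst:
--         if num > certain_value and num % divisible_value == 0 and num not in seen:
--             seen.add(num)
--             if len(seen) == 15:
--                 break
--     return sorted(seen, reverse=True)
-- ===== Notes on version B (the rewrite author's own statement) =====
-- stated objective: idiomatic
-- what changed: The hand-written index-swapping bubble sort is replaced by the built-in sorted(..., reverse=True) and the 'num not in sublist' list scan by a set of seen values; the capped encounter-order selection pass is unchanged.
import Mathlib
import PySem

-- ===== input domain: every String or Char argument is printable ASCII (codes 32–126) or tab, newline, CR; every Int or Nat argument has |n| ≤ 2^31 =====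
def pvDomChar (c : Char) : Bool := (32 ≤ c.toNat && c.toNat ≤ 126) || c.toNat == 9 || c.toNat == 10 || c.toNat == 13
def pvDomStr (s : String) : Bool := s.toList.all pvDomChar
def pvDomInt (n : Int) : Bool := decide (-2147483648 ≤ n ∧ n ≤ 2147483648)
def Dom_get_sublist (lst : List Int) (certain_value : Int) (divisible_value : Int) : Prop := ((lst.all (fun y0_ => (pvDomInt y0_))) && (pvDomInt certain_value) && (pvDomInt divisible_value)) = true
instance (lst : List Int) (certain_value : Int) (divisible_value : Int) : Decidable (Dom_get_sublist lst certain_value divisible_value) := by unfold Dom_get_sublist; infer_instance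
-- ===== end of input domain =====

-- B replaces A's hand-written bubble sort with the library descending sort and A's list membership
-- with a set; selection (encounter order, unique, cap 15) is unchanged (objective: idiomatic).


-- ===== PORT A =====
-- the selection loop of A: append num if num > certain_value, num % divisible_value == 0, not seen; break at 15
def selA (lst : List Int) (c d : Int) (sub : List Int) : List Int :=
  match lst with
  | [] => sub
  | n :: rest =>
    if c < n ∧ PySem.Int.mod n d = 0 ∧ n ∉ sub then
      if (sub ++ [n]).length = 15 then sub ++ [n] else selA rest c d (sub ++ [n])
    else selA rest c d sub

-- one comparison-and-swap step at index j: if sublist[j] < sublist[j+1], swap them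
def swapIf (l : List Int) (j : Nat) : List Int :=
  match l[j]?, l[j + 1]? with
  | some a, some b => if a < b then (l.set j b).set (j + 1) a else l
  | _, _ => l

-- inner loop: for j in range(k)
def innerLoop (l : List Int) (k : Nat) : List Int := (List.range k).foldl swapIf l

-- outer loop: for i in range(len(sublist) - 1)
def bubble (l : List Int) : List Int :=
  (List.range (l.length - 1)).foldl (fun acc i => innerLoop acc (acc.length - 1 - i)) l

def get_sublist (lst : List Int) (certain_value : Int) (divisible_value : Int) : List Int :=
  (bubble (selA lst certain_value divisible_value [])).take 15

-- ===== PORT B =====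
-- B's selection loop over a set 'seen'
def selB (lst : List Int) (c d : Int) (seen : PySem.Set Int) : PySem.Set Int :=
  match lst with
  | [] => seen
  | n :: rest =>
    if c < n ∧ PySem.Int.mod n d = 0 ∧ ¬ PySem.Set.contains seen n then
      if PySem.Set.len (PySem.Set.add seen n) = 15 then PySem.Set.add seen n
      else selB rest c d (PySem.Set.add seen n)
    else selB rest c d seen

def get_sublist_alt (lst : List Int) (certain_value : Int) (divisible_value : Int) : List Int :=
  PySem.List.sorted (selB lst certain_value divisible_value PySem.Set.empty) (fun x => x) true

-- ===== PRECONDITION & SPEC =====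
-- Pre_ excludes exactly the inputs where A (and B alike) raises ZeroDivisionError:
-- divisible_value = 0 with some element above certain_value, so that 'num % divisible_value' is evaluated.
def Pre_get_sublist (lst : List Int) (certain_value : Int) (divisible_value : Int) : Prop :=
  divisible_value ≠ 0 ∨ ∀ n ∈ lst, n ≤ certain_value
instance (lst : List Int) (certain_value : Int) (divisible_value : Int) : Decidable (Pre_get_sublist lst certain_value divisible_value) := by unfold Pre_get_sublist; infer_instance

def pvWitness_get_sublist : List Int × Int × Int := ([6, 4, 12, 6, -2], 3, 2)

def Spec_get_sublist (lst : List Int) (certain_value : Int) (divisible_value : Int) (out : List Int) : Prop := out = get_sublist_alt lst certain_value divisible_value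
instance (lst : List Int) (certain_value : Int) (divisible_value : Int) (out : List Int) : Decidable (Spec_get_sublist lst certain_value divisible_value out) := by unfold Spec_get_sublist; infer_instance

-- ===== CLAIM (what is proved, stated in full; the proofs are below) =====
def Claim_equal_get_sublist : Prop := ∀ (lst : List Int) (certain_value : Int) (divisible_value : Int), Dom_get_sublist lst certain_value divisible_value → Pre_get_sublist lst certain_value divisible_value → Spec_get_sublist lst certain_value divisible_value (get_sublist lst certain_value divisible_value)

-- ===== LEMMAS AND PROOFS =====

-- structural description of A's inner bubble pass of width k (first k+1 positions)
def bpassN : Nat → List Int → List Int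
  | 0, l => l
  | _ + 1, [] => []
  | _ + 1, [a] => [a]
  | k + 1, a :: b :: t => if a < b then b :: bpassN k (a :: t) else a :: bpassN k (b :: t)

-- A's outer loop as iterated passes of shrinking width
def bub : Nat → List Int → List Int
  | 0, l => l
  | k + 1, l => bub k (bpassN (k + 1) l)

theorem selA_eq_selB (lst : List Int) (c d : Int) (s : List Int) :
    selA lst c d s = selB lst c d s := by
  induction lst generalizing s with
  | nil => simp [selA, selB]
  | cons n rest ih =>
    simp only [selA, selB, PySem.Set.contains, PySem.Set.add, PySem.Set.len]
    by_cases hm : n ∈ s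
    · simp [hm, ih]
    · have hc : ((s.length : Int) + 1 = 15) ↔ (s.length = 14) := by omega
      simp [hm, ih, hc]

theorem selA_length_le (lst : List Int) (c d : Int) (s : List Int) (h : s.length < 15) :
    (selA lst c d s).length ≤ 15 := by
  induction lst generalizing s with
  | nil => simpa [selA] using Nat.le_of_lt h
  | cons n rest ih =>
    simp only [selA]
    split
    · split
      · rename_i h15; simp at h15 ⊢; omega
      · rename_i h15; exact ih _ (by simp at h15 ⊢; omega)
    · exact ih _ h

theorem selA_nodup (lst : List Int) (c d : Int) (s : List Int) (h : s.Nodup) :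
    (selA lst c d s).Nodup := by
  induction lst generalizing s with
  | nil => simpa [selA]
  | cons n rest ih =>
    simp only [selA]
    split
    · rename_i hc
      have hs' : (s ++ [n]).Nodup := by
        rw [List.nodup_append]
        refine ⟨h, List.nodup_singleton n, ?_⟩
        intro a ha b hb
        simp at hb
        subst hb
        exact fun hab => hc.2.2 (hab ▸ ha)
      split
      · exact hs'
      · exact ih _ hs'
    · exact ih _ h

theorem swapIf_cons_succ (c : Int) (m : List Int) (j : Nat) :
    swapIf (c :: m) (j + 1) = c :: swapIf m j := by
  simp only [swapIf, List.getElem?_cons_succ]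
  rcases h1 : m[j]? with _ | a <;> rcases h2 : m[j + 1]? with _ | b <;>
    simp only []
  split
  · simp [List.set_cons_succ]
  · rfl

theorem foldl_swapIf_map_succ (r : List Nat) (c : Int) (m : List Int) :
    (r.map Nat.succ).foldl swapIf (c :: m) = c :: r.foldl swapIf m := by
  induction r generalizing m with
  | nil => rfl
  | cons j r ih => simp [List.foldl_cons, swapIf_cons_succ, ih]

theorem innerLoop_eq_bpassN (k : Nat) (l : List Int) :
    innerLoop l k = bpassN k l := by
  induction k generalizing l with
  | zero => rfl
  | succ k ih =>
    match l with
    | [] =>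
      simp only [innerLoop] at *
      have hnil : ∀ r : List Nat, r.foldl swapIf ([] : List Int) = [] := by
        intro r; induction r with
        | nil => rfl
        | cons j r ihr => simp [List.foldl_cons, swapIf, ihr]
      simp [hnil, bpassN]
    | [a] =>
      simp only [innerLoop] at *
      have hone : ∀ r : List Nat, r.foldl swapIf ([a] : List Int) = [a] := by
        intro r; induction r with
        | nil => rfl
        | cons j r ihr =>
          have hsw : swapIf [a] j = [a] := by
            simp only [swapIf]
            match hj : ([a] : List Int)[j + 1]? with
            | some b => simp at hj
            | none => cases ([a] : List Int)[j]? <;> simp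
          simp [List.foldl_cons, hsw, ihr]
      simp [hone, bpassN]
    | a :: b :: t =>
      simp only [innerLoop, List.range_succ_eq_map, List.foldl_cons] at *
      have h0 : swapIf (a :: b :: t) 0 =
          if a < b then b :: a :: t else a :: b :: t := by
        simp [swapIf]
      rw [h0]
      by_cases hab : a < b
      · simp only [hab, if_pos, bpassN, foldl_swapIf_map_succ, ih]
      · simp only [hab, if_false, bpassN, foldl_swapIf_map_succ, ih]

theorem bpassN_perm (k : Nat) (l : List Int) : (bpassN k l).Perm l := by
  induction k generalizing l with
  | zero => simp [bpassN]
  | succ k ih =>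
    match l with
    | [] => simp [bpassN]
    | [a] => simp [bpassN]
    | a :: b :: t =>
      simp only [bpassN]
      split
      · exact ((ih (a :: t)).cons b).trans (List.Perm.swap a b t)
      · exact (ih (b :: t)).cons a

theorem bpassN_length (k : Nat) (l : List Int) : (bpassN k l).length = l.length :=
  (bpassN_perm k l).length_eq

theorem bpassN_append (k : Nat) (l s : List Int) (h : k < l.length) :
    bpassN k (l ++ s) = bpassN k l ++ s := by
  induction k generalizing l with
  | zero => simp [bpassN]
  | succ k ih =>
    match l with
    | [] => simp at h
    | [a] => simp at h
    | a :: b :: t =>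
      simp only [List.cons_append, bpassN]
      have ht : k < (t.length + 1) := by simp at h; omega
      split
      · rw [show a :: (t ++ s) = (a :: t) ++ s from rfl,
            ih (a :: t) (by simpa using ht)]
        rfl
      · rw [show b :: (t ++ s) = (b :: t) ++ s from rfl,
            ih (b :: t) (by simpa using ht)]
        rfl

theorem bpassN_last_min (k : Nat) (l : List Int) (hne : l ≠ []) (hlen : l.length ≤ k + 1) :
    ∃ f z, bpassN k l = f ++ [z] ∧ ∀ x ∈ l, z ≤ x := by
  induction k generalizing l with
  | zero =>
    match l with
    | [a] => exact ⟨[], a, rfl, by simp⟩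
    | [] => exact absurd rfl hne
    | a :: b :: t => simp at hlen
  | succ k ih =>
    match l with
    | [] => exact absurd rfl hne
    | [a] =>
      refine ⟨[], a, ?_, by simp⟩
      simp [bpassN]
    | a :: b :: t =>
      simp only [bpassN]
      have hlt : (a :: t).length ≤ k + 1 := by simp at hlen ⊢; omega
      by_cases hab : a < b
      · obtain ⟨f, z, he, hz⟩ := ih (a :: t) (by simp) hlt
        refine ⟨b :: f, z, by simp [hab, he], ?_⟩
        intro x hx
        simp at hx hz
        rcases hx with h | h | h
        · exact h ▸ hz.1
        · exact h ▸ le_trans hz.1 (le_of_lt hab)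
        · exact hz.2 x h
      · obtain ⟨f, z, he, hz⟩ := ih (b :: t) (by simp) (by simp at hlen ⊢; omega)
        refine ⟨a :: f, z, by simp [hab, he], ?_⟩
        intro x hx
        simp at hx hz
        rcases hx with h | h | h
        · exact h ▸ le_trans hz.1 (not_lt.mp hab)
        · exact h ▸ hz.1
        · exact hz.2 x h

theorem bub_perm (k : Nat) (l : List Int) : (bub k l).Perm l := by
  induction k generalizing l with
  | zero => simp [bub]
  | succ k ih => exact (ih _).trans (bpassN_perm _ _)

theorem bub_append (k : Nat) (f s : List Int) (h : k < f.length) :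
    bub k (f ++ s) = bub k f ++ s := by
  induction k generalizing f with
  | zero => rfl
  | succ k ih =>
    simp only [bub]
    rw [bpassN_append _ _ _ h]
    exact ih (bpassN (k + 1) f) (by rw [bpassN_length]; omega)

theorem bub_sorted (k : Nat) (l : List Int) (hlen : l.length ≤ k + 1) :
    (bub k l).Pairwise (fun a b => b ≤ a) := by
  induction k generalizing l with
  | zero =>
    match l with
    | [] => simp [bub]
    | [a] => simp [bub]
    | a :: b :: t => simp at hlen
  | succ k ih =>
    simp only [bub]
    by_cases hsmall : l.length ≤ k + 1
    · exact ih _ (by rw [bpassN_length]; omega)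
    · have hne : l ≠ [] := by intro h; subst h; simp at hsmall
      obtain ⟨f, z, he, hz⟩ := bpassN_last_min (k + 1) l hne hlen
      have hf : f.length = k + 1 := by
        have hl := bpassN_length (k + 1) l
        rw [he] at hl; simp at hl; omega
      rw [he, bub_append k f [z] (by omega)]
      apply List.pairwise_append.mpr
      refine ⟨ih f (by omega), by simp, ?_⟩
      intro x hx y hy
      simp at hy; rw [hy]
      apply hz
      have hxf : x ∈ f := (bub_perm k f).mem_iff.mp hx
      have hxl : x ∈ f ++ [z] := by simp [hxf]
      exact (bpassN_perm (k + 1) l).mem_iff.mp (he ▸ hxl)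

theorem bub_nodup_gt (k : Nat) (l : List Int) (hlen : l.length ≤ k + 1) (hnd : l.Nodup) :
    (bub k l).Pairwise (fun a b => b < a) := by
  have h1 := bub_sorted k l hlen
  have h2 : (bub k l).Nodup := (bub_perm k l).nodup_iff.mpr hnd
  exact (h1.and h2).imp (fun {a b} h => lt_of_le_of_ne h.1 (Ne.symm h.2))

def bubW : Nat → Nat → List Int → List Int
  | 0, _, l => l
  | k + 1, w, l => bubW k (w - 1) (bpassN w l)

theorem bub_eq_bubW (k : Nat) (l : List Int) : bub k l = bubW k k l := by
  induction k generalizing l with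
  | zero => rfl
  | succ k ih => simp only [bub, bubW, ih, Nat.add_sub_cancel]

theorem foldl_innerLoop_eq_bubW (j : Nat) :
    ∀ (off : Nat) (l : List Int),
      (List.range j).foldl (fun acc i => innerLoop acc (acc.length - 1 - (off + i))) l
        = bubW j (l.length - 1 - off) l := by
  induction j with
  | zero => intro off l; rfl
  | succ j ih =>
    intro off l
    rw [List.range_succ_eq_map, List.foldl_cons, List.foldl_map]
    have h1 : innerLoop l (l.length - 1 - (off + 0)) = bpassN (l.length - 1 - off) l := by
      rw [Nat.add_zero, innerLoop_eq_bpassN]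
    rw [h1]
    have h2 : (fun (acc : List Int) (i : Nat) => innerLoop acc (acc.length - 1 - (off + Nat.succ i)))
        = fun acc i => innerLoop acc (acc.length - 1 - ((off + 1) + i)) := by
      funext acc i; congr 1; omega
    rw [h2, ih (off + 1) (bpassN (l.length - 1 - off) l), bpassN_length]
    show bubW j (l.length - 1 - off - 1) _ = bubW (j + 1) (l.length - 1 - off) l
    rfl

theorem bubble_eq_bub (l : List Int) : bubble l = bub (l.length - 1) l := by
  unfold bubble
  have h := foldl_innerLoop_eq_bubW (l.length - 1) 0 l
  simp only [Nat.zero_add] at h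
  rw [h, Nat.sub_zero, bub_eq_bubW]

-- ===== VERDICT (by name: the statement is the Claim_ definition above) =====
theorem get_sublist_spec : Claim_equal_get_sublist := by
  intro lst c d _ _
  unfold Spec_get_sublist get_sublist get_sublist_alt
  rw [← selA_eq_selB]
  set S := selA lst c d [] with hS
  have hlen : S.length ≤ 15 := selA_length_le lst c d [] (by simp)
  have hnd : S.Nodup := selA_nodup lst c d [] (by simp)
  rw [bubble_eq_bub]
  have hb : S.length ≤ (S.length - 1) + 1 := by omega
  have hperm : (bub (S.length - 1) S).Perm S := bub_perm _ _
  rw [List.take_of_length_le (by rw [hperm.length_eq]; exact hlen)]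
  exact (PySem.List.sorted_rev_eq_of_perm_of_pairwise_gt S _ (fun x => x) hperm
    (bub_nodup_gt _ _ hb hnd)).symm
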